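-- pv_equiv track=rewrite | github.com/r64genji/UTM-Move | Backend/scripts/extract_campus_pois_final.py | categorize_poi
-- ===== SOURCE A (Python) =====
-- def categorize_poi(tags, name=""):
--     """Categorize POI based on OSM tags and name"""
--     building = tags.get("building", "")
--     amenity = tags.get("amenity", "")
--     shop = tags.get("shop", "")
--     leisure = tags.get("leisure", "")
--     name_lower = name.lower()
--
--     # RESIDENTIAL / HOSTELS
--     if building in ["dormitory", "hostel", "residential"]:
--         return "residential"
--     if any(x in name_lower for x in ["kolej", "hostel", "asrama", "ktf", "ktr", "ktho", "ktdi", "ktc", "kdse"]):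
--         return "residential"
--
--     # ACADEMIC - Only for actual academic buildings (faculties, lecture halls, etc.)
--     if building in ["university", "college", "school", "academic"]:
--         return "academic"
--     if amenity in ["university", "college", "library"]:
--         return "academic"
--     if any(x in name_lower for x in ["fakulti", "faculty", "dewan", "lecture", "tutorial"]):
--         return "academic"
--
--     # LIBRARY
--     if amenity == "library" or "perpustakaan" in name_lower or "psz" in name_lower:
--         return "library"
--
--     # DINING
--     if amenity in ["cafe", "restaurant", "fast_food", "food_court"]:
--         return "dining"
--     if any(x in name_lower for x in ["cafe", "kafe", "arked", "restoran", "kantin", "cafeteria", "mcd", "mcdonald", "burger king", "kfc"]):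
--         return "dining"
--
--     # SHOPPING / CONVENIENCE
--     if shop in ["convenience", "supermarket", "general", "kiosk", "mall"]:
--         return "shopping"
--     if any(x in name_lower for x in ["mart", "kedai", "shop", "store", "7-eleven", "99 speedmart"]):
--         return "shopping"
--
--     # SPORTS / RECREATION
--     if leisure in ["sports_centre", "stadium", "swimming_pool", "pitch", "track", "fitness_centre"]:
--         return "sports"
--     if any(x in name_lower for x in ["stadium", "gym", "kolam", "pool", "court", "padang", "fitness"]):
--         return "sports"
--
--     # RELIGIOUS
--     if amenity == "place_of_worship":
--         return "religious"
--     if any(x in name_lower for x in ["masjid", "surau", "mosque", "musolla", "chapel", "temple"]):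
--         return "religious"
--
--     # HEALTHCARE
--     if amenity in ["clinic", "hospital", "pharmacy", "doctors"]:
--         return "healthcare"
--     if any(x in name_lower for x in ["klinik", "clinic", "hospital", "farmasi", "pharmacy", "health"]):
--         return "healthcare"
--
--     # BANKING
--     if amenity in ["bank", "atm"]:
--         return "banking"
--     if any(x in name_lower for x in ["bank", "atm", "cimb", "maybank", "rhb"]):
--         return "banking"
--
--     # TRANSIT
--     if tags.get("highway") == "bus_stop" or tags.get("public_transport"):
--         return "transit"
--
--     # ADMINISTRATIVE
--     if tags.get("office") or any(x in name_lower for x in ["pejabat", "office", "admin", "canselori", "bursary"]):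
--         return "administrative"
--
--     # PARKING
--     if amenity == "parking":
--         return "parking"
--
--     # DEFAULT
--     if building:
--         return "building"
--
--     return "other"
-- ===== SOURCE B (Python) =====
-- # B: inverted lookup tables + collect-all-candidates-and-take-min instead of a first-match if/return cascade.
--
-- BUILDING_CAT = {
--     "dormitory": (0, "residential"), "hostel": (0, "residential"), "residential": (0, "residential"),
--     "university": (2, "academic"), "college": (2, "academic"), "school": (2, "academic"), "academic": (2, "academic"),
-- }
-- AMENITY_CAT = {
--     "university": (3, "academic"), "college": (3, "academic"), "library": (3, "academic"),
--     "cafe": (6, "dining"), "restaurant": (6, "dining"), "fast_food": (6, "dining"), "food_court": (6, "dining"),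
--     "place_of_worship": (12, "religious"),
--     "clinic": (14, "healthcare"), "hospital": (14, "healthcare"), "pharmacy": (14, "healthcare"), "doctors": (14, "healthcare"),
--     "bank": (16, "banking"), "atm": (16, "banking"),
--     "parking": (20, "parking"),
-- }
-- SHOP_CAT = {k: (8, "shopping") for k in ["convenience", "supermarket", "general", "kiosk", "mall"]}
-- LEISURE_CAT = {k: (10, "sports") for k in ["sports_centre", "stadium", "swimming_pool", "pitch", "track", "fitness_centre"]}
--
-- FIELD_TABLES = [("building", BUILDING_CAT), ("amenity", AMENITY_CAT), ("shop", SHOP_CAT), ("leisure", LEISURE_CAT)]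
--
-- KEYWORD_GROUPS = [
--     (["kolej", "hostel", "asrama", "ktf", "ktr", "ktho", "ktdi", "ktc", "kdse"], (1, "residential")),
--     (["fakulti", "faculty", "dewan", "lecture", "tutorial"], (4, "academic")),
--     (["perpustakaan", "psz"], (5, "library")),
--     (["cafe", "kafe", "arked", "restoran", "kantin", "cafeteria", "mcd", "mcdonald", "burger king", "kfc"], (7, "dining")),
--     (["mart", "kedai", "shop", "store", "7-eleven", "99 speedmart"], (9, "shopping")),
--     (["stadium", "gym", "kolam", "pool", "court", "padang", "fitness"], (11, "sports")),
--     (["masjid", "surau", "mosque", "musolla", "chapel", "temple"], (13, "religious")),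
--     (["klinik", "clinic", "hospital", "farmasi", "pharmacy", "health"], (15, "healthcare")),
--     (["bank", "atm", "cimb", "maybank", "rhb"], (17, "banking")),
-- ]
--
--
-- def _candidates(tags, nl):
--     """All (priority, category) matches; priorities encode the intended precedence."""
--     cands = []
--     for field, table in FIELD_TABLES:
--         hit = table.get(tags.get(field, ""))
--         if hit is not None:
--             cands.append(hit)
--     for words, rule in KEYWORD_GROUPS:
--         if any(w in nl for w in words):
--             cands.append(rule)
--     if tags.get("highway") == "bus_stop" or tags.get("public_transport"):
--         cands.append((18, "transit"))
--     if tags.get("office") or any(x in nl for x in ["pejabat", "office", "admin", "canselori", "bursary"]):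
--         cands.append((19, "administrative"))
--     return cands
--
--
-- def categorize_poi(tags, name=""):
--     cands = _candidates(tags, name.lower())
--     if cands:
--         return min(cands, key=lambda c: c[0])[1]
--     return "building" if tags.get("building") else "other"
-- ===== Notes on version B (the rewrite author's own statement) =====
-- stated objective: alternative
-- what changed: A's first-match if/return cascade is replaced by inverted value->(priority,category) dictionaries for the building/amenity/shop/leisure fields plus a keyword-group table: B collects ALL matching candidates with their priorities and returns the minimum-priority one (priorities encode A's rule order), with the building/other default when nothing matches.
import Mathlib
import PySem

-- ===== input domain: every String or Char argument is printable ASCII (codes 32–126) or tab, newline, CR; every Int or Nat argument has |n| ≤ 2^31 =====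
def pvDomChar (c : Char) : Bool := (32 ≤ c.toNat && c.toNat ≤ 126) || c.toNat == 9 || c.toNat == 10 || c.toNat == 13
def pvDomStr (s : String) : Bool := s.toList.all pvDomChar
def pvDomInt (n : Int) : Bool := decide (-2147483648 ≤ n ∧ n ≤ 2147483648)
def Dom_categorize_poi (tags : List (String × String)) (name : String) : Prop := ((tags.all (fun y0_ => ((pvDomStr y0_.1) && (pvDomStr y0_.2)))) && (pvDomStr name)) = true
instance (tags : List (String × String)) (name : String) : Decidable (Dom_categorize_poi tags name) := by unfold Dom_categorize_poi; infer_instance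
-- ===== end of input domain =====

-- B replaces A's first-match if/return cascade by inverted value→(priority,category) dictionaries
-- plus a keyword table: it collects ALL matching candidates and returns the minimum-priority one
-- (objective: alternative algorithm; same cost).

-- ===== PORT A =====
-- literal transliteration of A's if/return chain
def categorize_poi (tags : List (String × String)) (name : String) : String :=
  let d := PySem.Dict.mk tags
  let building := d.getD "building" ""
  let amenity := d.getD "amenity" ""
  let shop := d.getD "shop" ""
  let leisure := d.getD "leisure" ""
  let name_lower := PySem.Str.lower name
  if ["dormitory", "hostel", "residential"].contains building then "residential"
  else if ["kolej", "hostel", "asrama", "ktf", "ktr", "ktho", "ktdi", "ktc", "kdse"].any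
      (fun x => PySem.Str.isIn x name_lower) then "residential"
  else if ["university", "college", "school", "academic"].contains building then "academic"
  else if ["university", "college", "library"].contains amenity then "academic"
  else if ["fakulti", "faculty", "dewan", "lecture", "tutorial"].any
      (fun x => PySem.Str.isIn x name_lower) then "academic"
  else if amenity == "library" || PySem.Str.isIn "perpustakaan" name_lower
      || PySem.Str.isIn "psz" name_lower then "library"
  else if ["cafe", "restaurant", "fast_food", "food_court"].contains amenity then "dining"
  else if ["cafe", "kafe", "arked", "restoran", "kantin", "cafeteria", "mcd", "mcdonald",
      "burger king", "kfc"].any (fun x => PySem.Str.isIn x name_lower) then "dining"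
  else if ["convenience", "supermarket", "general", "kiosk", "mall"].contains shop then "shopping"
  else if ["mart", "kedai", "shop", "store", "7-eleven", "99 speedmart"].any
      (fun x => PySem.Str.isIn x name_lower) then "shopping"
  else if ["sports_centre", "stadium", "swimming_pool", "pitch", "track",
      "fitness_centre"].contains leisure then "sports"
  else if ["stadium", "gym", "kolam", "pool", "court", "padang", "fitness"].any
      (fun x => PySem.Str.isIn x name_lower) then "sports"
  else if amenity == "place_of_worship" then "religious"
  else if ["masjid", "surau", "mosque", "musolla", "chapel", "temple"].any
      (fun x => PySem.Str.isIn x name_lower) then "religious"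
  else if ["clinic", "hospital", "pharmacy", "doctors"].contains amenity then "healthcare"
  else if ["klinik", "clinic", "hospital", "farmasi", "pharmacy", "health"].any
      (fun x => PySem.Str.isIn x name_lower) then "healthcare"
  else if ["bank", "atm"].contains amenity then "banking"
  else if ["bank", "atm", "cimb", "maybank", "rhb"].any
      (fun x => PySem.Str.isIn x name_lower) then "banking"
  -- tags.get("highway") == "bus_stop": absent key (None) never equals the string, so getD "" is exact;
  -- truthiness of tags.get("public_transport") / tags.get("office") = present with a nonempty string
  else if (d.getD "highway" "") == "bus_stop" || !((d.getD "public_transport" "") == "") then "transit"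
  else if !((d.getD "office" "") == "") || ["pejabat", "office", "admin", "canselori", "bursary"].any
      (fun x => PySem.Str.isIn x name_lower) then "administrative"
  else if amenity == "parking" then "parking"
  else if !(building == "") then "building"
  else "other"

-- ===== PORT B =====
-- B-side helpers: inverted value→(priority, category) tables, one per tag field
def pvBuildingCat : PySem.Dict String (Int × String) := PySem.Dict.mk
  [("dormitory", (0, "residential")), ("hostel", (0, "residential")), ("residential", (0, "residential")),
   ("university", (2, "academic")), ("college", (2, "academic")), ("school", (2, "academic")), ("academic", (2, "academic"))]

def pvAmenityCat : PySem.Dict String (Int × String) := PySem.Dict.mk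
  [("university", (3, "academic")), ("college", (3, "academic")), ("library", (3, "academic")),
   ("cafe", (6, "dining")), ("restaurant", (6, "dining")), ("fast_food", (6, "dining")), ("food_court", (6, "dining")),
   ("place_of_worship", (12, "religious")),
   ("clinic", (14, "healthcare")), ("hospital", (14, "healthcare")), ("pharmacy", (14, "healthcare")), ("doctors", (14, "healthcare")),
   ("bank", (16, "banking")), ("atm", (16, "banking")),
   ("parking", (20, "parking"))]

def pvShopCat : PySem.Dict String (Int × String) := PySem.Dict.mk
  [("convenience", (8, "shopping")), ("supermarket", (8, "shopping")), ("general", (8, "shopping")),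
   ("kiosk", (8, "shopping")), ("mall", (8, "shopping"))]

def pvLeisureCat : PySem.Dict String (Int × String) := PySem.Dict.mk
  [("sports_centre", (10, "sports")), ("stadium", (10, "sports")), ("swimming_pool", (10, "sports")),
   ("pitch", (10, "sports")), ("track", (10, "sports")), ("fitness_centre", (10, "sports"))]

def pvFieldTables : List (String × PySem.Dict String (Int × String)) :=
  [("building", pvBuildingCat), ("amenity", pvAmenityCat), ("shop", pvShopCat), ("leisure", pvLeisureCat)]

def pvKeywordGroups : List (List String × (Int × String)) :=
  [(["kolej", "hostel", "asrama", "ktf", "ktr", "ktho", "ktdi", "ktc", "kdse"], ((1 : Int), "residential")),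
   (["fakulti", "faculty", "dewan", "lecture", "tutorial"], ((4 : Int), "academic")),
   (["perpustakaan", "psz"], ((5 : Int), "library")),
   (["cafe", "kafe", "arked", "restoran", "kantin", "cafeteria", "mcd", "mcdonald", "burger king", "kfc"], ((7 : Int), "dining")),
   (["mart", "kedai", "shop", "store", "7-eleven", "99 speedmart"], ((9 : Int), "shopping")),
   (["stadium", "gym", "kolam", "pool", "court", "padang", "fitness"], ((11 : Int), "sports")),
   (["masjid", "surau", "mosque", "musolla", "chapel", "temple"], ((13 : Int), "religious")),
   (["klinik", "clinic", "hospital", "farmasi", "pharmacy", "health"], ((15 : Int), "healthcare")),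
   (["bank", "atm", "cimb", "maybank", "rhb"], ((17 : Int), "banking"))]

-- all (priority, category) matches, as in Source B's _candidates
def pvCands (d : PySem.Dict String String) (nl : String) : List (Int × String) :=
  let c0 := pvFieldTables.foldl
    (fun acc ft => match ft.2.get? (d.getD ft.1 "") with | some h => acc ++ [h] | none => acc) []
  let c1 := pvKeywordGroups.foldl
    (fun acc g => if g.1.any (fun w => PySem.Str.isIn w nl) then acc ++ [g.2] else acc) c0
  let c2 := if (d.getD "highway" "") == "bus_stop" || !((d.getD "public_transport" "") == "")
    then c1 ++ [((18 : Int), "transit")] else c1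
  if !((d.getD "office" "") == "") || ["pejabat", "office", "admin", "canselori", "bursary"].any
      (fun x => PySem.Str.isIn x nl)
    then c2 ++ [((19 : Int), "administrative")] else c2

def categorize_poi_alt (tags : List (String × String)) (name : String) : String :=
  let d := PySem.Dict.mk tags
  let cands := pvCands d (PySem.Str.lower name)
  match PySem.List.min? cands (fun c => c.1) with
  | some m => m.2
  | none => if !((d.getD "building" "") == "") then "building" else "other"

-- ===== PRECONDITION & SPEC =====
def Spec_categorize_poi (tags : List (String × String)) (name : String) (out : String) : Prop := out = categorize_poi_alt tags name
instance (tags : List (String × String)) (name : String) (out : String) : Decidable (Spec_categorize_poi tags name out) := by unfold Spec_categorize_poi; infer_instance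

-- ===== CLAIM (what is proved, stated in full; the proofs are below) =====
def Claim_equal_categorize_poi : Prop := ∀ (tags : List (String × String)) (name : String), Dom_categorize_poi tags name → Spec_categorize_poi tags name (categorize_poi tags name)

-- ===== LEMMAS AND PROOFS =====

-- A's 21 rules in priority order: (priority, category) and the condition of rule j
def pvRuleL : List (Int × String) :=
  [(0, "residential"), (1, "residential"), (2, "academic"), (3, "academic"), (4, "academic"),
   (5, "library"), (6, "dining"), (7, "dining"), (8, "shopping"), (9, "shopping"),
   (10, "sports"), (11, "sports"), (12, "religious"), (13, "religious"), (14, "healthcare"),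
   (15, "healthcare"), (16, "banking"), (17, "banking"), (18, "transit"), (19, "administrative"),
   (20, "parking")]

def pvRule (j : Nat) : Int × String := pvRuleL.getD j (21, "other")

-- condition of rule j as evaluated by B (rule 5 is the keyword part only: the amenity=="library"
-- clause of A's rule 5 is shadowed by A's rule 3)
def pvCond (d : PySem.Dict String String) (nl : String) : Nat → Bool
  | 0 => ["dormitory", "hostel", "residential"].contains (d.getD "building" "")
  | 1 => ["kolej", "hostel", "asrama", "ktf", "ktr", "ktho", "ktdi", "ktc", "kdse"].any
      (fun x => PySem.Str.isIn x nl)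
  | 2 => ["university", "college", "school", "academic"].contains (d.getD "building" "")
  | 3 => ["university", "college", "library"].contains (d.getD "amenity" "")
  | 4 => ["fakulti", "faculty", "dewan", "lecture", "tutorial"].any (fun x => PySem.Str.isIn x nl)
  | 5 => ["perpustakaan", "psz"].any (fun x => PySem.Str.isIn x nl)
  | 6 => ["cafe", "restaurant", "fast_food", "food_court"].contains (d.getD "amenity" "")
  | 7 => ["cafe", "kafe", "arked", "restoran", "kantin", "cafeteria", "mcd", "mcdonald",
      "burger king", "kfc"].any (fun x => PySem.Str.isIn x nl)
  | 8 => ["convenience", "supermarket", "general", "kiosk", "mall"].contains (d.getD "shop" "")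
  | 9 => ["mart", "kedai", "shop", "store", "7-eleven", "99 speedmart"].any
      (fun x => PySem.Str.isIn x nl)
  | 10 => ["sports_centre", "stadium", "swimming_pool", "pitch", "track",
      "fitness_centre"].contains (d.getD "leisure" "")
  | 11 => ["stadium", "gym", "kolam", "pool", "court", "padang", "fitness"].any
      (fun x => PySem.Str.isIn x nl)
  | 12 => (d.getD "amenity" "") == "place_of_worship"
  | 13 => ["masjid", "surau", "mosque", "musolla", "chapel", "temple"].any
      (fun x => PySem.Str.isIn x nl)
  | 14 => ["clinic", "hospital", "pharmacy", "doctors"].contains (d.getD "amenity" "")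
  | 15 => ["klinik", "clinic", "hospital", "farmasi", "pharmacy", "health"].any
      (fun x => PySem.Str.isIn x nl)
  | 16 => ["bank", "atm"].contains (d.getD "amenity" "")
  | 17 => ["bank", "atm", "cimb", "maybank", "rhb"].any (fun x => PySem.Str.isIn x nl)
  | 18 => (d.getD "highway" "") == "bus_stop" || !((d.getD "public_transport" "") == "")
  | 19 => !((d.getD "office" "") == "") || ["pejabat", "office", "admin", "canselori",
      "bursary"].any (fun x => PySem.Str.isIn x nl)
  | 20 => (d.getD "amenity" "") == "parking"
  | _ => false

lemma pv_mem_fieldfold (d : PySem.Dict String String)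
    (l : List (String × PySem.Dict String (Int × String))) (acc : List (Int × String))
    (x : Int × String) :
    x ∈ l.foldl (fun acc ft =>
        match ft.2.get? (d.getD ft.1 "") with | some h => acc ++ [h] | none => acc) acc ↔
      x ∈ acc ∨ ∃ ft ∈ l, ft.2.get? (d.getD ft.1 "") = some x := by
  induction l generalizing acc with
  | nil => simp
  | cons hd tl ih =>
    cases h : hd.2.get? (d.getD hd.1 "") with
    | none => simp [List.foldl_cons, h, ih]
    | some v =>
      simp only [List.foldl_cons, h, ih, List.mem_append, List.mem_singleton]
      constructor
      · rintro ((hx | rfl) | ⟨e, he, hfe⟩)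
        · exact Or.inl hx
        · exact Or.inr ⟨hd, List.mem_cons_self .., h⟩
        · exact Or.inr ⟨e, List.mem_cons_of_mem _ he, hfe⟩
      · rintro (hx | ⟨e, he, hfe⟩)
        · exact Or.inl (Or.inl hx)
        · rcases List.mem_cons.1 he with rfl | he'
          · rw [h] at hfe; exact Or.inl (Or.inr (Option.some_injective _ hfe).symm)
          · exact Or.inr ⟨e, he', hfe⟩

-- what a successful lookup in each literal table implies
lemma pvBuilding_get (k : String) (x : Int × String) (h : pvBuildingCat.get? k = some x) :
    (["dormitory", "hostel", "residential"].contains k = true ∧ x = (0, "residential")) ∨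
    (["university", "college", "school", "academic"].contains k = true ∧ x = (2, "academic")) := by
  rw [PySem.Dict.get?_eq_some_iff_mem_items _ _ _ (by decide)] at h
  fin_cases h <;> decide

lemma pvAmenity_get (k : String) (x : Int × String) (h : pvAmenityCat.get? k = some x) :
    (["university", "college", "library"].contains k = true ∧ x = (3, "academic")) ∨
    (["cafe", "restaurant", "fast_food", "food_court"].contains k = true ∧ x = (6, "dining")) ∨
    ((k == "place_of_worship") = true ∧ x = (12, "religious")) ∨
    (["clinic", "hospital", "pharmacy", "doctors"].contains k = true ∧ x = (14, "healthcare")) ∨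
    (["bank", "atm"].contains k = true ∧ x = (16, "banking")) ∨
    ((k == "parking") = true ∧ x = (20, "parking")) := by
  rw [PySem.Dict.get?_eq_some_iff_mem_items _ _ _ (by decide)] at h
  fin_cases h <;> decide

lemma pvShop_get (k : String) (x : Int × String) (h : pvShopCat.get? k = some x) :
    ["convenience", "supermarket", "general", "kiosk", "mall"].contains k = true ∧
      x = (8, "shopping") := by
  rw [PySem.Dict.get?_eq_some_iff_mem_items _ _ _ (by decide)] at h
  fin_cases h <;> decide

lemma pvLeisure_get (k : String) (x : Int × String) (h : pvLeisureCat.get? k = some x) :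
    ["sports_centre", "stadium", "swimming_pool", "pitch", "track", "fitness_centre"].contains k
        = true ∧ x = (10, "sports") := by
  rw [PySem.Dict.get?_eq_some_iff_mem_items _ _ _ (by decide)] at h
  fin_cases h <;> decide

-- converse: a true condition determines the lookup
lemma pvBuilding_get_res (k : String)
    (h : ["dormitory", "hostel", "residential"].contains k = true) :
    pvBuildingCat.get? k = some (0, "residential") := by
  simp only [List.contains_eq_mem, List.mem_cons, decide_eq_true_eq, List.not_mem_nil,
    or_false] at h
  rcases h with rfl | rfl | rfl <;> rfl

lemma pvBuilding_get_acad (k : String)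
    (h : ["university", "college", "school", "academic"].contains k = true) :
    pvBuildingCat.get? k = some (2, "academic") := by
  simp only [List.contains_eq_mem, List.mem_cons, decide_eq_true_eq, List.not_mem_nil,
    or_false] at h
  rcases h with rfl | rfl | rfl | rfl <;> rfl

lemma pvAmenity_get_acad (k : String)
    (h : ["university", "college", "library"].contains k = true) :
    pvAmenityCat.get? k = some (3, "academic") := by
  simp only [List.contains_eq_mem, List.mem_cons, decide_eq_true_eq, List.not_mem_nil,
    or_false] at h
  rcases h with rfl | rfl | rfl <;> rfl

lemma pvAmenity_get_dining (k : String)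
    (h : ["cafe", "restaurant", "fast_food", "food_court"].contains k = true) :
    pvAmenityCat.get? k = some (6, "dining") := by
  simp only [List.contains_eq_mem, List.mem_cons, decide_eq_true_eq, List.not_mem_nil,
    or_false] at h
  rcases h with rfl | rfl | rfl | rfl <;> rfl

lemma pvAmenity_get_health (k : String)
    (h : ["clinic", "hospital", "pharmacy", "doctors"].contains k = true) :
    pvAmenityCat.get? k = some (14, "healthcare") := by
  simp only [List.contains_eq_mem, List.mem_cons, decide_eq_true_eq, List.not_mem_nil,
    or_false] at h
  rcases h with rfl | rfl | rfl | rfl <;> rfl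

lemma pvAmenity_get_bank (k : String) (h : ["bank", "atm"].contains k = true) :
    pvAmenityCat.get? k = some (16, "banking") := by
  simp only [List.contains_eq_mem, List.mem_cons, decide_eq_true_eq, List.not_mem_nil,
    or_false] at h
  rcases h with rfl | rfl <;> rfl

lemma pvShop_get_of (k : String)
    (h : ["convenience", "supermarket", "general", "kiosk", "mall"].contains k = true) :
    pvShopCat.get? k = some (8, "shopping") := by
  simp only [List.contains_eq_mem, List.mem_cons, decide_eq_true_eq, List.not_mem_nil,
    or_false] at h
  rcases h with rfl | rfl | rfl | rfl | rfl <;> rfl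

lemma pvLeisure_get_of (k : String)
    (h : ["sports_centre", "stadium", "swimming_pool", "pitch", "track",
      "fitness_centre"].contains k = true) :
    pvLeisureCat.get? k = some (10, "sports") := by
  simp only [List.contains_eq_mem, List.mem_cons, decide_eq_true_eq, List.not_mem_nil,
    or_false] at h
  rcases h with rfl | rfl | rfl | rfl | rfl | rfl <;> rfl

-- the shape of pvCands as a disjunction of its four sources
lemma pv_mem_ite_append {α : Type} (c : Bool) (l : List α) (a x : α) :
    (x ∈ if c = true then l ++ [a] else l) ↔ x ∈ l ∨ (c = true ∧ x = a) := by
  cases c <;> simp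

set_option maxHeartbeats 1000000 in
lemma pv_cands_shape (d : PySem.Dict String String) (nl : String) (x : Int × String) :
    x ∈ pvCands d nl ↔
      (pvBuildingCat.get? (d.getD "building" "") = some x ∨
       pvAmenityCat.get? (d.getD "amenity" "") = some x ∨
       pvShopCat.get? (d.getD "shop" "") = some x ∨
       pvLeisureCat.get? (d.getD "leisure" "") = some x) ∨
      (∃ g ∈ pvKeywordGroups, g.1.any (fun w => PySem.Str.isIn w nl) = true ∧ x = g.2) ∨
      (((d.getD "highway" "") == "bus_stop" || !((d.getD "public_transport" "") == "")) = true ∧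
        x = (18, "transit")) ∨
      ((!((d.getD "office" "") == "") || ["pejabat", "office", "admin", "canselori",
          "bursary"].any (fun w => PySem.Str.isIn w nl)) = true ∧
        x = (19, "administrative")) := by
  simp only [pvCands]
  rw [PySem.List.foldl_append_if]
  simp only [pv_mem_ite_append, List.mem_append, pv_mem_fieldfold, List.mem_map,
    List.mem_filter, List.not_mem_nil, false_or, pvFieldTables,
    List.mem_cons]
  constructor
  · rintro (((⟨ft, hft, hget⟩ | ⟨g, ⟨hg, hp⟩, hx⟩) | ⟨hc, rfl⟩) | ⟨hc, rfl⟩)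
    · rcases hft with rfl | rfl | rfl | rfl | hF
      · exact Or.inl (Or.inl hget)
      · exact Or.inl (Or.inr (Or.inl hget))
      · exact Or.inl (Or.inr (Or.inr (Or.inl hget)))
      · exact Or.inl (Or.inr (Or.inr (Or.inr hget)))
      · exact hF.elim
    · exact Or.inr (Or.inl ⟨g, hg, hp, hx.symm⟩)
    · exact Or.inr (Or.inr (Or.inl ⟨hc, rfl⟩))
    · exact Or.inr (Or.inr (Or.inr ⟨hc, rfl⟩))
  · rintro ((h | h | h | h) | ⟨g, hg, hp, rfl⟩ | ⟨hc, rfl⟩ | ⟨hc, rfl⟩)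
    · exact Or.inl (Or.inl (Or.inl ⟨_, Or.inl rfl, h⟩))
    · exact Or.inl (Or.inl (Or.inl ⟨_, Or.inr (Or.inl rfl), h⟩))
    · exact Or.inl (Or.inl (Or.inl ⟨_, Or.inr (Or.inr (Or.inl rfl)), h⟩))
    · exact Or.inl (Or.inl (Or.inl ⟨_, Or.inr (Or.inr (Or.inr (Or.inl rfl))), h⟩))
    · exact Or.inl (Or.inl (Or.inr ⟨g, ⟨hg, hp⟩, rfl⟩))
    · exact Or.inl (Or.inr ⟨hc, rfl⟩)
    · exact Or.inr ⟨hc, rfl⟩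

lemma pv_mem_cands (d : PySem.Dict String String) (nl : String) (x : Int × String) :
    x ∈ pvCands d nl ↔ ∃ j, j < 21 ∧ pvCond d nl j = true ∧ x = pvRule j := by
  rw [pv_cands_shape]
  constructor
  · rintro ((h | h | h | h) | ⟨g, hg, hany, rfl⟩ | ⟨hc, rfl⟩ | ⟨hc, rfl⟩)
    · rcases pvBuilding_get _ _ h with ⟨hc, rfl⟩ | ⟨hc, rfl⟩
      · exact ⟨0, by omega, hc, rfl⟩
      · exact ⟨2, by omega, hc, rfl⟩
    · rcases pvAmenity_get _ _ h with ⟨hc, rfl⟩ | ⟨hc, rfl⟩ | ⟨hc, rfl⟩ | ⟨hc, rfl⟩ |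
        ⟨hc, rfl⟩ | ⟨hc, rfl⟩
      · exact ⟨3, by omega, hc, rfl⟩
      · exact ⟨6, by omega, hc, rfl⟩
      · exact ⟨12, by omega, hc, rfl⟩
      · exact ⟨14, by omega, hc, rfl⟩
      · exact ⟨16, by omega, hc, rfl⟩
      · exact ⟨20, by omega, hc, rfl⟩
    · rcases pvShop_get _ _ h with ⟨hc, rfl⟩
      exact ⟨8, by omega, hc, rfl⟩
    · rcases pvLeisure_get _ _ h with ⟨hc, rfl⟩
      exact ⟨10, by omega, hc, rfl⟩
    · fin_cases hg
      · exact ⟨1, by omega, hany, rfl⟩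
      · exact ⟨4, by omega, hany, rfl⟩
      · exact ⟨5, by omega, hany, rfl⟩
      · exact ⟨7, by omega, hany, rfl⟩
      · exact ⟨9, by omega, hany, rfl⟩
      · exact ⟨11, by omega, hany, rfl⟩
      · exact ⟨13, by omega, hany, rfl⟩
      · exact ⟨15, by omega, hany, rfl⟩
      · exact ⟨17, by omega, hany, rfl⟩
    · exact ⟨18, by omega, hc, rfl⟩
    · exact ⟨19, by omega, hc, rfl⟩
  · rintro ⟨j, hj, hc, rfl⟩
    interval_cases j
    · exact Or.inl (Or.inl (pvBuilding_get_res _ hc))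
    · exact Or.inr (Or.inl ⟨(["kolej", "hostel", "asrama", "ktf", "ktr", "ktho", "ktdi",
        "ktc", "kdse"], ((1 : Int), "residential")), by decide, hc, rfl⟩)
    · exact Or.inl (Or.inl (pvBuilding_get_acad _ hc))
    · exact Or.inl (Or.inr (Or.inl (pvAmenity_get_acad _ hc)))
    · exact Or.inr (Or.inl ⟨(["fakulti", "faculty", "dewan", "lecture", "tutorial"],
        ((4 : Int), "academic")), by decide, hc, rfl⟩)
    · exact Or.inr (Or.inl ⟨(["perpustakaan", "psz"], ((5 : Int), "library")), by decide, hc, rfl⟩)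
    · exact Or.inl (Or.inr (Or.inl (pvAmenity_get_dining _ hc)))
    · exact Or.inr (Or.inl ⟨(["cafe", "kafe", "arked", "restoran", "kantin", "cafeteria",
        "mcd", "mcdonald", "burger king", "kfc"], ((7 : Int), "dining")), by decide, hc, rfl⟩)
    · exact Or.inl (Or.inr (Or.inr (Or.inl (pvShop_get_of _ hc))))
    · exact Or.inr (Or.inl ⟨(["mart", "kedai", "shop", "store", "7-eleven", "99 speedmart"],
        ((9 : Int), "shopping")), by decide, hc, rfl⟩)
    · exact Or.inl (Or.inr (Or.inr (Or.inr (pvLeisure_get_of _ hc))))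
    · exact Or.inr (Or.inl ⟨(["stadium", "gym", "kolam", "pool", "court", "padang", "fitness"],
        ((11 : Int), "sports")), by decide, hc, rfl⟩)
    · refine Or.inl (Or.inr (Or.inl ?_))
      have hc' : (d.getD "amenity" "" == "place_of_worship") = true := hc
      rw [show d.getD "amenity" "" = "place_of_worship" from by simpa using hc']; rfl
    · exact Or.inr (Or.inl ⟨(["masjid", "surau", "mosque", "musolla", "chapel", "temple"],
        ((13 : Int), "religious")), by decide, hc, rfl⟩)
    · exact Or.inl (Or.inr (Or.inl (pvAmenity_get_health _ hc)))
    · exact Or.inr (Or.inl ⟨(["klinik", "clinic", "hospital", "farmasi", "pharmacy", "health"],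
        ((15 : Int), "healthcare")), by decide, hc, rfl⟩)
    · exact Or.inl (Or.inr (Or.inl (pvAmenity_get_bank _ hc)))
    · exact Or.inr (Or.inl ⟨(["bank", "atm", "cimb", "maybank", "rhb"],
        ((17 : Int), "banking")), by decide, hc, rfl⟩)
    · exact Or.inr (Or.inr (Or.inl ⟨hc, rfl⟩))
    · exact Or.inr (Or.inr (Or.inr ⟨hc, rfl⟩))
    · refine Or.inl (Or.inr (Or.inl ?_))
      have hc' : (d.getD "amenity" "" == "parking") = true := hc
      rw [show d.getD "amenity" "" = "parking" from by simpa using hc']; rfl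

lemma pv_rule_fst : ∀ j, j < 21 → (pvRule j).1 = (j : Int) := by decide

lemma pv_cands_min (d : PySem.Dict String String) (nl : String) (j : Nat) (hj : j < 21)
    (hc : pvCond d nl j = true) (hp : ∀ k, k < j → pvCond d nl k = false) :
    PySem.List.min? (pvCands d nl) (fun c => c.1) = some (pvRule j) := by
  have hmem : pvRule j ∈ pvCands d nl := (pv_mem_cands d nl _).2 ⟨j, hj, hc, rfl⟩
  cases hmin : PySem.List.min? (pvCands d nl) (fun c => c.1) with
  | none =>
    rw [PySem.List.min?_eq_none_iff] at hmin
    rw [hmin] at hmem; cases hmem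
  | some m =>
    obtain ⟨k, hk21, hck, rfl⟩ := (pv_mem_cands d nl m).1 (PySem.List.min?_mem hmin)
    have hle := PySem.List.min?_isMin hmin _ hmem
    simp only [pv_rule_fst k hk21, pv_rule_fst j hj] at hle
    have hkj : ¬ k < j := fun h => by rw [hp k h] at hck; cases hck
    have : k = j := by omega
    rw [this]

lemma pv_cands_nil (d : PySem.Dict String String) (nl : String)
    (hall : ∀ k, k < 21 → pvCond d nl k = false) : pvCands d nl = [] := by
  rw [List.eq_nil_iff_forall_not_mem]
  intro x hx
  obtain ⟨j, hj, hc, _⟩ := (pv_mem_cands d nl x).1 hx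
  rw [hall j hj] at hc; cases hc

lemma pv_alt_eq (tags : List (String × String)) (name : String) (j : Nat) (hj : j < 21)
    (hc : pvCond (PySem.Dict.mk tags) (PySem.Str.lower name) j = true)
    (hp : ∀ k, k < j → pvCond (PySem.Dict.mk tags) (PySem.Str.lower name) k = false) :
    categorize_poi_alt tags name = (pvRule j).2 := by
  simp only [categorize_poi_alt]
  rw [pv_cands_min _ _ j hj hc hp]

lemma pv_alt_default (tags : List (String × String)) (name : String)
    (hall : ∀ k, k < 21 → pvCond (PySem.Dict.mk tags) (PySem.Str.lower name) k = false) :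
    categorize_poi_alt tags name =
      if !(((PySem.Dict.mk tags).getD "building" "") == "") then "building" else "other" := by
  simp only [categorize_poi_alt]
  rw [pv_cands_nil _ _ hall]
  rfl

lemma pv_push (d : PySem.Dict String String) (nl : String) (j : Nat)
    (hp : ∀ k, k < j → pvCond d nl k = false) (hj : pvCond d nl j = false) :
    ∀ k, k < j + 1 → pvCond d nl k = false := by
  intro k hk
  rcases Nat.lt_succ_iff_lt_or_eq.1 hk with h | rfl
  · exact hp k h
  · exact hj

-- ===== VERDICT (by name: the statement is the Claim_ definition above) =====
set_option maxHeartbeats 16000000 in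
theorem categorize_poi_spec : Claim_equal_categorize_poi := by
  intro tags name _
  unfold Spec_categorize_poi
  simp only [categorize_poi]
  have hp0 : ∀ k, k < 0 → pvCond (PySem.Dict.mk tags) (PySem.Str.lower name) k = false :=
    fun k hk => absurd hk (by omega)
  cases h0 : (["dormitory", "hostel", "residential"].contains ((PySem.Dict.mk tags).getD "building" "")) with
  | true => exact (pv_alt_eq tags name 0 (by omega) h0 hp0).symm
  | false =>
  have h0' : pvCond (PySem.Dict.mk tags) (PySem.Str.lower name) 0 = false := h0
  have hp1 := pv_push _ _ 0 hp0 h0'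
  cases h1 : (["kolej", "hostel", "asrama", "ktf", "ktr", "ktho", "ktdi", "ktc", "kdse"].any fun x => PySem.Str.isIn x (PySem.Str.lower name)) with
  | true => exact (pv_alt_eq tags name 1 (by omega) h1 hp1).symm
  | false =>
  have h1' : pvCond (PySem.Dict.mk tags) (PySem.Str.lower name) 1 = false := h1
  have hp2 := pv_push _ _ 1 hp1 h1'
  cases h2 : (["university", "college", "school", "academic"].contains ((PySem.Dict.mk tags).getD "building" "")) with
  | true => exact (pv_alt_eq tags name 2 (by omega) h2 hp2).symm
  | false =>
  have h2' : pvCond (PySem.Dict.mk tags) (PySem.Str.lower name) 2 = false := h2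
  have hp3 := pv_push _ _ 2 hp2 h2'
  cases h3 : (["university", "college", "library"].contains ((PySem.Dict.mk tags).getD "amenity" "")) with
  | true => exact (pv_alt_eq tags name 3 (by omega) h3 hp3).symm
  | false =>
  have h3' : pvCond (PySem.Dict.mk tags) (PySem.Str.lower name) 3 = false := h3
  have hp4 := pv_push _ _ 3 hp3 h3'
  cases h4 : (["fakulti", "faculty", "dewan", "lecture", "tutorial"].any fun x => PySem.Str.isIn x (PySem.Str.lower name)) with
  | true => exact (pv_alt_eq tags name 4 (by omega) h4 hp4).symm
  | false =>
  have h4' : pvCond (PySem.Dict.mk tags) (PySem.Str.lower name) 4 = false := h4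
  have hp5 := pv_push _ _ 4 hp4 h4'
  cases h5 : ((PySem.Dict.mk tags).getD "amenity" "" == "library" || PySem.Str.isIn "perpustakaan" (PySem.Str.lower name) || PySem.Str.isIn "psz" (PySem.Str.lower name)) with
  | true =>
    have hb5 : pvCond (PySem.Dict.mk tags) (PySem.Str.lower name) 5 = true := by
      have hli : ((PySem.Dict.mk tags).getD "amenity" "" == "library") = false := by
        cases hbeq : ((PySem.Dict.mk tags).getD "amenity" "" == "library") with
        | false => rfl
        | true =>
          rw [show (PySem.Dict.mk tags).getD "amenity" "" = "library" from by simpa using hbeq]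
            at h3
          exact absurd h3 (by decide)
      rw [hli, Bool.false_or] at h5
      show (["perpustakaan", "psz"].any fun x => PySem.Str.isIn x (PySem.Str.lower name)) = true
      simp only [List.any_cons, List.any_nil, Bool.or_false]
      exact h5
    exact (pv_alt_eq tags name 5 (by omega) hb5 hp5).symm
  | false =>
  have h5' : pvCond (PySem.Dict.mk tags) (PySem.Str.lower name) 5 = false := by
    simp only [Bool.or_eq_false_iff] at h5
    show (["perpustakaan", "psz"].any fun x => PySem.Str.isIn x (PySem.Str.lower name)) = false
    simp only [List.any_cons, List.any_nil, Bool.or_false, Bool.or_eq_false_iff]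
    exact ⟨h5.1.2, h5.2⟩
  have hp6 := pv_push _ _ 5 hp5 h5'
  cases h6 : (["cafe", "restaurant", "fast_food", "food_court"].contains ((PySem.Dict.mk tags).getD "amenity" "")) with
  | true => exact (pv_alt_eq tags name 6 (by omega) h6 hp6).symm
  | false =>
  have h6' : pvCond (PySem.Dict.mk tags) (PySem.Str.lower name) 6 = false := h6
  have hp7 := pv_push _ _ 6 hp6 h6'
  cases h7 : (["cafe", "kafe", "arked", "restoran", "kantin", "cafeteria", "mcd", "mcdonald", "burger king", "kfc"].any fun x => PySem.Str.isIn x (PySem.Str.lower name)) with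
  | true => exact (pv_alt_eq tags name 7 (by omega) h7 hp7).symm
  | false =>
  have h7' : pvCond (PySem.Dict.mk tags) (PySem.Str.lower name) 7 = false := h7
  have hp8 := pv_push _ _ 7 hp7 h7'
  cases h8 : (["convenience", "supermarket", "general", "kiosk", "mall"].contains ((PySem.Dict.mk tags).getD "shop" "")) with
  | true => exact (pv_alt_eq tags name 8 (by omega) h8 hp8).symm
  | false =>
  have h8' : pvCond (PySem.Dict.mk tags) (PySem.Str.lower name) 8 = false := h8
  have hp9 := pv_push _ _ 8 hp8 h8'
  cases h9 : (["mart", "kedai", "shop", "store", "7-eleven", "99 speedmart"].any fun x => PySem.Str.isIn x (PySem.Str.lower name)) with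
  | true => exact (pv_alt_eq tags name 9 (by omega) h9 hp9).symm
  | false =>
  have h9' : pvCond (PySem.Dict.mk tags) (PySem.Str.lower name) 9 = false := h9
  have hp10 := pv_push _ _ 9 hp9 h9'
  cases h10 : (["sports_centre", "stadium", "swimming_pool", "pitch", "track", "fitness_centre"].contains ((PySem.Dict.mk tags).getD "leisure" "")) with
  | true => exact (pv_alt_eq tags name 10 (by omega) h10 hp10).symm
  | false =>
  have h10' : pvCond (PySem.Dict.mk tags) (PySem.Str.lower name) 10 = false := h10
  have hp11 := pv_push _ _ 10 hp10 h10'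
  cases h11 : (["stadium", "gym", "kolam", "pool", "court", "padang", "fitness"].any fun x => PySem.Str.isIn x (PySem.Str.lower name)) with
  | true => exact (pv_alt_eq tags name 11 (by omega) h11 hp11).symm
  | false =>
  have h11' : pvCond (PySem.Dict.mk tags) (PySem.Str.lower name) 11 = false := h11
  have hp12 := pv_push _ _ 11 hp11 h11'
  cases h12 : ((PySem.Dict.mk tags).getD "amenity" "" == "place_of_worship") with
  | true => exact (pv_alt_eq tags name 12 (by omega) h12 hp12).symm
  | false =>
  have h12' : pvCond (PySem.Dict.mk tags) (PySem.Str.lower name) 12 = false := h12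
  have hp13 := pv_push _ _ 12 hp12 h12'
  cases h13 : (["masjid", "surau", "mosque", "musolla", "chapel", "temple"].any fun x => PySem.Str.isIn x (PySem.Str.lower name)) with
  | true => exact (pv_alt_eq tags name 13 (by omega) h13 hp13).symm
  | false =>
  have h13' : pvCond (PySem.Dict.mk tags) (PySem.Str.lower name) 13 = false := h13
  have hp14 := pv_push _ _ 13 hp13 h13'
  cases h14 : (["clinic", "hospital", "pharmacy", "doctors"].contains ((PySem.Dict.mk tags).getD "amenity" "")) with
  | true => exact (pv_alt_eq tags name 14 (by omega) h14 hp14).symm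
  | false =>
  have h14' : pvCond (PySem.Dict.mk tags) (PySem.Str.lower name) 14 = false := h14
  have hp15 := pv_push _ _ 14 hp14 h14'
  cases h15 : (["klinik", "clinic", "hospital", "farmasi", "pharmacy", "health"].any fun x => PySem.Str.isIn x (PySem.Str.lower name)) with
  | true => exact (pv_alt_eq tags name 15 (by omega) h15 hp15).symm
  | false =>
  have h15' : pvCond (PySem.Dict.mk tags) (PySem.Str.lower name) 15 = false := h15
  have hp16 := pv_push _ _ 15 hp15 h15'
  cases h16 : (["bank", "atm"].contains ((PySem.Dict.mk tags).getD "amenity" "")) with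
  | true => exact (pv_alt_eq tags name 16 (by omega) h16 hp16).symm
  | false =>
  have h16' : pvCond (PySem.Dict.mk tags) (PySem.Str.lower name) 16 = false := h16
  have hp17 := pv_push _ _ 16 hp16 h16'
  cases h17 : (["bank", "atm", "cimb", "maybank", "rhb"].any fun x => PySem.Str.isIn x (PySem.Str.lower name)) with
  | true => exact (pv_alt_eq tags name 17 (by omega) h17 hp17).symm
  | false =>
  have h17' : pvCond (PySem.Dict.mk tags) (PySem.Str.lower name) 17 = false := h17
  have hp18 := pv_push _ _ 17 hp17 h17'
  cases h18 : ((PySem.Dict.mk tags).getD "highway" "" == "bus_stop" || !((PySem.Dict.mk tags).getD "public_transport" "" == "")) with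
  | true => exact (pv_alt_eq tags name 18 (by omega) h18 hp18).symm
  | false =>
  have h18' : pvCond (PySem.Dict.mk tags) (PySem.Str.lower name) 18 = false := h18
  have hp19 := pv_push _ _ 18 hp18 h18'
  cases h19 : (!((PySem.Dict.mk tags).getD "office" "" == "") || ["pejabat", "office", "admin", "canselori", "bursary"].any fun x => PySem.Str.isIn x (PySem.Str.lower name)) with
  | true => exact (pv_alt_eq tags name 19 (by omega) h19 hp19).symm
  | false =>
  have h19' : pvCond (PySem.Dict.mk tags) (PySem.Str.lower name) 19 = false := h19
  have hp20 := pv_push _ _ 19 hp19 h19'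
  cases h20 : ((PySem.Dict.mk tags).getD "amenity" "" == "parking") with
  | true => exact (pv_alt_eq tags name 20 (by omega) h20 hp20).symm
  | false =>
  have h20' : pvCond (PySem.Dict.mk tags) (PySem.Str.lower name) 20 = false := h20
  have hp21 := pv_push _ _ 20 hp20 h20'
  exact (pv_alt_default tags name hp21).symm
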